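-- pv_equiv track=rewrite | github.com/nyberry/waffle | solveWaffle.py | solve
-- ===== SOURCE A (Python) =====
-- def solve(state, B, sequence, depth=10):
--     if depth <= 0:  # Stop recursion if depth limit is reached
--         return
--
--     newstate = state[:]  # Create a new copy of state
--     c = [idx for idx in range(len(state)) if newstate[idx] != B[idx]]  # Find mismatched indices
--
--     if not c:  # If there are no mismatched indices
--         yield sequence[:], state  # Yield a copy of the sequence
--         return
--
--     for i in range(len(c)):
--         for j in range(i + 1, len(c)):
--             if B[c[j]] == newstate[c[i]]:
--                 # Create a copy of the current state and sequence
--                 newstate_copy = newstate[:]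
--                 sequence_copy = sequence[:]
--
--                 # Swap the elements in the copied state
--                 newstate_copy[c[i]], newstate_copy[c[j]] = newstate_copy[c[j]], newstate_copy[c[i]]
--
--                 # Add the swap to the sequence
--                 sequence_copy.append((c[i], c[j]))
--
--                 # Recurse with a decremented depth
--                 yield from solve(newstate_copy, B, sequence_copy, depth - 1)
-- ===== SOURCE B (Python) =====
-- def solve(state, B, sequence, depth=10):
--     # Iterative depth-first search with an explicit stack of frames instead of
--     # recursion.  Children are pushed in reverse so the LIFO pop order
--     # reproduces the recursion's pre-order yield sequence.
--     stack = [(state, sequence, depth)]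
--     while stack:
--         st, seq, d = stack.pop()
--         if d <= 0:
--             continue
--         c = [i for i in range(len(st)) if st[i] != B[i]]
--         if not c:
--             yield seq[:], st
--             continue
--         children = []
--         for i in range(len(c)):
--             for j in range(i + 1, len(c)):
--                 if B[c[j]] == st[c[i]]:
--                     ns = st[:]
--                     ns[c[i]], ns[c[j]] = ns[c[j]], ns[c[i]]
--                     children.append((ns, seq + [(c[i], c[j])], d - 1))
--         stack.extend(reversed(children))
-- ===== Notes on version B (the rewrite author's own statement) =====
-- stated objective: alternative
-- what changed: The recursive generator is replaced by an iterative depth-first search driven by an explicit stack of (state, sequence, depth) frames; children are pushed in reverse so the LIFO pop order reproduces the recursion's pre-order yield sequence exactly.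
import Mathlib
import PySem

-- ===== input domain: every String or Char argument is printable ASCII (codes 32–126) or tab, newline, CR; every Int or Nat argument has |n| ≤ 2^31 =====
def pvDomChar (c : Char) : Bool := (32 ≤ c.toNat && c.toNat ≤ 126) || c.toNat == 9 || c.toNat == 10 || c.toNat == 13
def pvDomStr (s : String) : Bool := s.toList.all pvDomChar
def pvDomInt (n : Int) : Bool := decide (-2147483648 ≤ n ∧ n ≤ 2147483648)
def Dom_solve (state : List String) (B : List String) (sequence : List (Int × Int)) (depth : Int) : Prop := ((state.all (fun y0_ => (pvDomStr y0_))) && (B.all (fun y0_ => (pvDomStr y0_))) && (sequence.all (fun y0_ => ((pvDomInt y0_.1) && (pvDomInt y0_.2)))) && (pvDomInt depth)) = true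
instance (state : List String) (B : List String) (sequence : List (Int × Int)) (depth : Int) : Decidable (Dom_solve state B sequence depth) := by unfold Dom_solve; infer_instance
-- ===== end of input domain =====

-- B replaces A's recursion by an iterative depth-first search over an explicit stack of
-- (state, sequence, depth) frames, children pushed in reverse to keep the yield order
-- (objective: alternative). Both Pythons are generators; the ports return the yielded list.

-- ===== PORT A =====
-- Indices used with getD are always < state.length resp. < B.length under Pre_solve,
-- so List.getD is exact for Python's xs[i] here.
def solve (state : List String) (B : List String) (sequence : List (Int × Int)) (depth : Int) : List ((List (Int × Int)) × List String) :=
  if _h : depth ≤ 0 then []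
  else
    let newstate := state
    let c := (List.range state.length).filter (fun idx => newstate.getD idx "" != B.getD idx "")
    if c.isEmpty then [(sequence, state)]
    else
      (List.range c.length).flatMap (fun i =>
        (List.range' (i + 1) (c.length - (i + 1))).flatMap (fun j =>
          if B.getD (c.getD j 0) "" = newstate.getD (c.getD i 0) "" then
            let ci := c.getD i 0
            let cj := c.getD j 0
            let newstate_copy := (newstate.set ci (newstate.getD cj "")).set cj (newstate.getD ci "")
            let sequence_copy := sequence ++ [((ci : Int), (cj : Int))]
            solve newstate_copy B sequence_copy (depth - 1)
          else []))
termination_by depth.toNat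
decreasing_by simp_wf; omega

-- ===== PORT B =====
-- The Python stack (pop from the end, extend with reversed(children)) is modelled with
-- the TOP of the stack at the HEAD of the list: pop = head, and
-- 'extend(reversed(children)); pop last first' = prepend children in order.
def pvMeasure (fr : List String × List (Int × Int) × Int) : Nat :=
  (fr.1.length * fr.1.length + 1) ^ fr.2.2.toNat

-- termination helpers, cited by solveRun's decreasing_by
theorem pv_sum_map_le {α : Type} (l : List α) (f : α → Nat) (m : Nat)
    (h : ∀ x ∈ l, f x ≤ m) : (l.map f).sum ≤ l.length * m := by
  induction l with
  | nil => simp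
  | cons a t ih =>
    simp only [List.map_cons, List.sum_cons, List.length_cons]
    have h1 := ih (fun x hx => h x (List.mem_cons_of_mem a hx))
    have h2 := h a (List.mem_cons_self)
    calc f a + (t.map f).sum ≤ m + t.length * m := Nat.add_le_add h2 h1
      _ = (t.length + 1) * m := by rw [Nat.succ_mul, Nat.add_comm]

theorem pv_len_flatMap_le {α β : Type} (l : List α) (g : α → List β) (m : Nat)
    (h : ∀ x ∈ l, (g x).length ≤ m) : (l.flatMap g).length ≤ l.length * m := by
  rw [List.length_flatMap]
  have := pv_sum_map_le l (fun x => (g x).length) m h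
  exact this

theorem pv_dec_tail (fr : List String × List (Int × Int) × Int)
    (rest : List (List String × List (Int × Int) × Int)) :
    (List.map pvMeasure rest).sum < (List.map pvMeasure (fr :: rest)).sum := by
  have h : 0 < pvMeasure fr := pow_pos (Nat.succ_pos _) _
  simp only [List.map_cons, List.sum_cons]
  exact Nat.lt_add_of_pos_left h

theorem pv_dec_gen (st : List String) (seq : List (Int × Int)) (d : Int)
    (rest children : List (List String × List (Int × Int) × Int))
    (hlen : children.length ≤ st.length * st.length)
    (hmem : ∀ fr ∈ children, pvMeasure fr = (st.length * st.length + 1) ^ (d - 1).toNat)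
    (hd : ¬ d ≤ 0) :
    (List.map pvMeasure (children ++ rest)).sum < (List.map pvMeasure ((st, seq, d) :: rest)).sum := by
  have hsum : (children.map pvMeasure).sum
      ≤ children.length * (st.length * st.length + 1) ^ (d - 1).toNat :=
    pv_sum_map_le _ _ _ (fun x hx => le_of_eq (hmem x hx))
  have hdt : (d - 1).toNat + 1 = d.toNat := by
    have h0 : 0 < d := Int.not_le.mp hd
    have h1 : 0 < d.toNat := by exact_mod_cast Int.le_toNat (le_of_lt h0) |>.mpr h0
    rw [Int.pred_toNat]
    exact Nat.succ_pred_eq_of_pos h1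
  have hkey : (children.map pvMeasure).sum < pvMeasure (st, seq, d) := by
    show _ < (st.length * st.length + 1) ^ d.toNat
    calc (children.map pvMeasure).sum
        ≤ (st.length * st.length) * (st.length * st.length + 1) ^ (d - 1).toNat :=
          le_trans hsum (Nat.mul_le_mul_right _ hlen)
      _ < (st.length * st.length + 1) * (st.length * st.length + 1) ^ (d - 1).toNat :=
          Nat.mul_lt_mul_of_lt_of_le (Nat.lt_succ_self _) (le_refl _) (pow_pos (Nat.succ_pos _) _)
      _ = (st.length * st.length + 1) ^ ((d - 1).toNat + 1) := by rw [pow_succ, Nat.mul_comm]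
      _ = (st.length * st.length + 1) ^ d.toNat := by rw [hdt]
  have hfin := Nat.add_lt_add_right hkey ((rest.map pvMeasure).sum)
  simpa only [List.map_append, List.sum_append, List.map_cons, List.sum_cons] using hfin

theorem pv_dec_children (B st : List String) (seq : List (Int × Int)) (d : Int)
    (rest : List (List String × List (Int × Int) × Int)) (h : ¬ d ≤ 0) :
    (List.map pvMeasure
        (((List.range ((List.range st.length).filter (fun i => st.getD i "" != B.getD i "")).length).flatMap (fun i =>
          (List.range' (i + 1) (((List.range st.length).filter (fun i => st.getD i "" != B.getD i "")).length - (i + 1))).flatMap (fun j =>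
            if B.getD (((List.range st.length).filter (fun i => st.getD i "" != B.getD i "")).getD j 0) ""
                = st.getD (((List.range st.length).filter (fun i => st.getD i "" != B.getD i "")).getD i 0) "" then
              [(((st.set (((List.range st.length).filter (fun i => st.getD i "" != B.getD i "")).getD i 0)
                    (st.getD (((List.range st.length).filter (fun i => st.getD i "" != B.getD i "")).getD j 0) "")).set
                    (((List.range st.length).filter (fun i => st.getD i "" != B.getD i "")).getD j 0)
                    (st.getD (((List.range st.length).filter (fun i => st.getD i "" != B.getD i "")).getD i 0) "")),
                seq ++ [((((List.range st.length).filter (fun i => st.getD i "" != B.getD i "")).getD i 0 : Int),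
                         (((List.range st.length).filter (fun i => st.getD i "" != B.getD i "")).getD j 0 : Int))], d - 1)]
            else []))) ++ rest)).sum
      < (List.map pvMeasure ((st, seq, d) :: rest)).sum := by
  refine pv_dec_gen st seq d rest _ ?_ ?_ h
  · refine le_trans (pv_len_flatMap_le _ _
      ((List.range st.length).filter (fun i => st.getD i "" != B.getD i "")).length ?_) ?_
    · intro i _
      refine le_trans (pv_len_flatMap_le _ _ 1 ?_) ?_
      · intro j _
        split
        · exact le_refl _
        · exact Nat.zero_le _
      · rw [Nat.mul_one, List.length_range']
        exact Nat.sub_le _ _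
    · rw [List.length_range]
      have hf : ((List.range st.length).filter (fun i => st.getD i "" != B.getD i "")).length
          ≤ st.length := by
        refine le_trans (List.length_filter_le _ _) ?_
        rw [List.length_range]
      exact Nat.mul_le_mul hf hf
  · intro fr hfr
    rw [List.mem_flatMap] at hfr
    obtain ⟨i, -, hfr⟩ := hfr
    rw [List.mem_flatMap] at hfr
    obtain ⟨j, -, hj⟩ := hfr
    split at hj
    · rw [List.mem_singleton] at hj
      subst hj
      show (_ ^ _ : Nat) = _
      rw [List.length_set, List.length_set]
    · exact absurd hj (List.not_mem_nil)

def solveRun (B : List String) : List (List String × List (Int × Int) × Int) → List ((List (Int × Int)) × List String)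
  | [] => []
  | (st, seq, d) :: rest =>
    if _h : d ≤ 0 then solveRun B rest
    else
      let c := (List.range st.length).filter (fun i => st.getD i "" != B.getD i "")
      if c.isEmpty then (seq, st) :: solveRun B rest
      else
        let children := (List.range c.length).flatMap (fun i =>
          (List.range' (i + 1) (c.length - (i + 1))).flatMap (fun j =>
            if B.getD (c.getD j 0) "" = st.getD (c.getD i 0) "" then
              [(((st.set (c.getD i 0) (st.getD (c.getD j 0) "")).set (c.getD j 0) (st.getD (c.getD i 0) "")),
                seq ++ [((c.getD i 0 : Int), (c.getD j 0 : Int))], d - 1)]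
            else []))
        solveRun B (children ++ rest)
termination_by frames => (frames.map pvMeasure).sum
decreasing_by
  · exact pv_dec_tail _ _
  · exact pv_dec_tail _ _
  · exact pv_dec_children B st seq d rest _h

def solve_alt (state : List String) (B : List String) (sequence : List (Int × Int)) (depth : Int) : List ((List (Int × Int)) × List String) :=
  solveRun B [(state, sequence, depth)]

-- ===== PRECONDITION & SPEC =====
-- Pre_solve: with depth > 0, Python A indexes B[idx] for every idx < len(state), so it
-- raises IndexError exactly when depth > 0 and B is shorter than state; those inputs are excluded.
def Pre_solve (state : List String) (B : List String) (sequence : List (Int × Int)) (depth : Int) : Prop :=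
  depth ≤ 0 ∨ state.length ≤ B.length
instance (state : List String) (B : List String) (sequence : List (Int × Int)) (depth : Int) : Decidable (Pre_solve state B sequence depth) := by unfold Pre_solve; infer_instance

def pvWitness_solve : List String × List String × (List (Int × Int)) × Int :=
  (["a", "b"], ["b", "a"], [], 3)

def Spec_solve (state : List String) (B : List String) (sequence : List (Int × Int)) (depth : Int) (out : List ((List (Int × Int)) × List String)) : Prop := out = solve_alt state B sequence depth
instance (state : List String) (B : List String) (sequence : List (Int × Int)) (depth : Int) (out : List ((List (Int × Int)) × List String)) : Decidable (Spec_solve state B sequence depth out) := by unfold Spec_solve; infer_instance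

-- ===== CLAIM (what is proved, stated in full; the proofs are below) =====
def Claim_equal_solve : Prop := ∀ (state : List String) (B : List String) (sequence : List (Int × Int)) (depth : Int), Dom_solve state B sequence depth → Pre_solve state B sequence depth → Spec_solve state B sequence depth (solve state B sequence depth)

-- ===== LEMMAS AND PROOFS =====

-- proof-side names for the mismatch list and the child-frame list both ports build
def pvMism (B st : List String) : List Nat :=
  (List.range st.length).filter (fun i => st.getD i "" != B.getD i "")

def pvChildren (B st : List String) (seq : List (Int × Int)) (d : Int) :
    List (List String × List (Int × Int) × Int) :=
  (List.range (pvMism B st).length).flatMap (fun i =>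
    (List.range' (i + 1) ((pvMism B st).length - (i + 1))).flatMap (fun j =>
      if B.getD ((pvMism B st).getD j 0) "" = st.getD ((pvMism B st).getD i 0) "" then
        [(((st.set ((pvMism B st).getD i 0) (st.getD ((pvMism B st).getD j 0) "")).set
              ((pvMism B st).getD j 0) (st.getD ((pvMism B st).getD i 0) "")),
          seq ++ [(((pvMism B st).getD i 0 : Int), ((pvMism B st).getD j 0 : Int))], d - 1)]
      else []))

theorem pv_solve_eq (state B : List String) (seq : List (Int × Int)) (d : Int) :
    solve state B seq d =
      if d ≤ 0 then []
      else if (pvMism B state).isEmpty then [(seq, state)]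
      else
        (List.range (pvMism B state).length).flatMap (fun i =>
          (List.range' (i + 1) ((pvMism B state).length - (i + 1))).flatMap (fun j =>
            if B.getD ((pvMism B state).getD j 0) "" = state.getD ((pvMism B state).getD i 0) "" then
              solve ((state.set ((pvMism B state).getD i 0) (state.getD ((pvMism B state).getD j 0) "")).set
                  ((pvMism B state).getD j 0) (state.getD ((pvMism B state).getD i 0) "")) B
                (seq ++ [(((pvMism B state).getD i 0 : Int), ((pvMism B state).getD j 0 : Int))]) (d - 1)
            else [])) := by
  rw [solve]; rfl

theorem pv_run_nil (B : List String) : solveRun B [] = [] := by rw [solveRun]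

theorem pv_run_cons (B st : List String) (seq : List (Int × Int)) (d : Int)
    (rest : List (List String × List (Int × Int) × Int)) :
    solveRun B ((st, seq, d) :: rest) =
      if d ≤ 0 then solveRun B rest
      else if (pvMism B st).isEmpty then (seq, st) :: solveRun B rest
      else solveRun B (pvChildren B st seq d ++ rest) := by
  rw [solveRun]; rfl

-- (if c then [a] else []).flatMap g
theorem pv_flatMap_if_singleton {α β : Type} (c : Prop) [Decidable c] (a : α) (g : α → List β) :
    (if c then [a] else []).flatMap g = if c then g a else [] := by
  split <;> simp

-- flatMapping A's recursion over the child frames is exactly A's step branch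
theorem pv_children_flatMap (B st : List String) (seq : List (Int × Int)) (d : Int) :
    (pvChildren B st seq d).flatMap (fun fr => solve fr.1 B fr.2.1 fr.2.2) =
      (List.range (pvMism B st).length).flatMap (fun i =>
        (List.range' (i + 1) ((pvMism B st).length - (i + 1))).flatMap (fun j =>
          if B.getD ((pvMism B st).getD j 0) "" = st.getD ((pvMism B st).getD i 0) "" then
            solve ((st.set ((pvMism B st).getD i 0) (st.getD ((pvMism B st).getD j 0) "")).set
                ((pvMism B st).getD j 0) (st.getD ((pvMism B st).getD i 0) "")) B
              (seq ++ [(((pvMism B st).getD i 0 : Int), ((pvMism B st).getD j 0 : Int))]) (d - 1)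
          else [])) := by
  rw [pvChildren, List.flatMap_assoc]
  apply List.flatMap_congr
  intro i _
  rw [List.flatMap_assoc]
  apply List.flatMap_congr
  intro j _
  rw [pv_flatMap_if_singleton]

-- the explicit stack computes, frame by frame, exactly what A's recursion computes
theorem pv_run_eq_flatMap (B : List String) (frames : List (List String × List (Int × Int) × Int)) :
    solveRun B frames = frames.flatMap (fun fr => solve fr.1 B fr.2.1 fr.2.2) := by
  induction frames using solveRun.induct B with
  | case1 => rw [pv_run_nil, List.flatMap_nil]
  | case2 st seq d rest h ih =>
    rw [pv_run_cons, if_pos h, ih, List.flatMap_cons, pv_solve_eq, if_pos h, List.nil_append]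
  | case3 st seq d rest h c hce ih =>
    have hce' : (pvMism B st).isEmpty = true := hce
    rw [pv_run_cons, if_neg h, if_pos hce', ih, List.flatMap_cons,
      pv_solve_eq, if_neg h, if_pos hce', List.singleton_append]
  | case4 st seq d rest h c hce children ih =>
    have hce' : ¬ (pvMism B st).isEmpty = true := hce
    have ih' : solveRun B (pvChildren B st seq d ++ rest)
        = (pvChildren B st seq d ++ rest).flatMap (fun fr => solve fr.1 B fr.2.1 fr.2.2) := ih
    rw [pv_run_cons, if_neg h, if_neg hce', ih', List.flatMap_append, List.flatMap_cons,
      pv_solve_eq, if_neg h, if_neg hce', pv_children_flatMap]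

-- ===== VERDICT (by name: the statement is the Claim_ definition above) =====
theorem solve_spec : Claim_equal_solve := by
  intro state B seq depth _ _
  show solve state B seq depth = solve_alt state B seq depth
  rw [solve_alt, pv_run_eq_flatMap, List.flatMap_cons, List.flatMap_nil, List.append_nil]
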